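-- pv_equiv track=rewrite | github.com/fkie-cad/socbed | src/attacks/tests/test_generateattackchains.py | get_attack_blocks
-- ===== SOURCE A (Python) =====
-- def get_attack_blocks(lines):
--     blocks = list()
--     for (i, line) in enumerate(lines):
--         if not line.split()[0] == "use":
--             continue
--         j = i + 1
--         while not lines[j].split()[0] == "back":
--             j += 1
--         blocks.append(lines[i:j + 1])
--     return blocks
-- ===== SOURCE B (Python) =====
-- def get_attack_blocks(lines):
--     blocks = []
--     open_starts = []
--     for i, line in enumerate(lines):
--         tok = line.split()[0]
--         if tok == "use":
--             open_starts.append(i)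
--         elif tok == "back":
--             for s in open_starts:
--                 blocks.append(lines[s:i + 1])
--             open_starts = []
--     return blocks
-- ===== Notes on version B (the rewrite author's own statement) =====
-- stated objective: alternative
-- what changed: Instead of re-scanning forward from every 'use' line to find its 'back' (nested while inside the for), B makes a single pass keeping the indices of pending 'use' lines and closes them all when a 'back' line arrives.
-- crash fix: On inputs whose every line has a first token but where some 'use' line has no later 'back' line, A's forward scan runs off the end and raises IndexError; B returns just the blocks of the 'use' lines that are closed. — e.g. on get_attack_blocks(["use exploit", "back", "use other"]): A raises IndexError, B returns [["use exploit", "back"]]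
import Mathlib
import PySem

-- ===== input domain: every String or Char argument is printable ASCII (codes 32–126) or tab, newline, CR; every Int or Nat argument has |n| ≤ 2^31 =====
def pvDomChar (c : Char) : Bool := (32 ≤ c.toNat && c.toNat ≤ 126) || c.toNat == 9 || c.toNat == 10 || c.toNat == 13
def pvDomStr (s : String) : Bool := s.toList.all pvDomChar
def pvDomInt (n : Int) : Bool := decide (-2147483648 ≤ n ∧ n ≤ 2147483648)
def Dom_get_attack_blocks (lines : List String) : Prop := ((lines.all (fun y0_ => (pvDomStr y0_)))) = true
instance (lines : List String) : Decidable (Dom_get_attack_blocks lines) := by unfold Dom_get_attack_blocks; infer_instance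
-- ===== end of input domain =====

-- B: a single pass that keeps the indices of pending 'use' lines and closes them all at each 'back',
-- instead of A's per-'use' forward rescan for its 'back' (alternative algorithm, same measured cost).

-- line.split()[0]; "" where Python raises IndexError (Pre_ excludes whitespace-only lines)
def pvTok (s : String) : String := (PySem.Str.split₀ s).getD 0 ""

-- A's inner 'while not lines[j].split()[0] == "back": j += 1'; none where Python's scan runs off the end (IndexError)
def pvFindBack (lines : List String) (j : Nat) : Option Nat :=
  if h : j < lines.length then
    if pvTok lines[j] = "back" then some j
    else pvFindBack lines (j + 1)
  else none
termination_by lines.length - j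

-- ===== PORT A =====
def get_attack_blocks (lines : List String) : List (List String) :=
  (PySem.List.enumerate lines).foldl
    (fun blocks p =>
      if ¬ (pvTok p.2 = "use") then blocks
      else
        match pvFindBack lines (p.1.toNat + 1) with
        | some j => blocks ++ [PySem.List.slice lines (some p.1) (some ((j : Int) + 1))]
        | none => blocks)  -- Python raises IndexError here (unclosed 'use'); outside Pre_
    []

-- ===== PORT B =====
def get_attack_blocks_alt (lines : List String) : List (List String) :=
  ((PySem.List.enumerate lines).foldl
    (fun (st : List (List String) × List Int) p =>
      let tok := pvTok p.2
      if tok = "use" then (st.1, st.2 ++ [p.1])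
      else if tok = "back" then
        (st.1 ++ st.2.map (fun s => PySem.List.slice lines (some s) (some (p.1 + 1))), [])
      else st)
    ([], [])).1

-- ===== PRECONDITION & SPEC =====
-- Pre_ excludes exactly the inputs where the Python A raises IndexError: a whitespace-only line
-- anywhere (line.split()[0]), or a 'use' line with no later 'back' line (the forward scan runs off the end).
def Pre_get_attack_blocks (lines : List String) : Prop :=
  (∀ l ∈ lines, PySem.Str.split₀ l ≠ []) ∧
  (∀ i ∈ List.range lines.length, pvTok (lines.getD i "") = "use" →
    ∃ j ∈ List.range lines.length, i < j ∧ pvTok (lines.getD j "") = "back")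
instance (lines : List String) : Decidable (Pre_get_attack_blocks lines) := by
  unfold Pre_get_attack_blocks; infer_instance

def pvWitness_get_attack_blocks : List String := ["use exploit", "set x 1", "back", "info"]

-- A raises IndexError on inputs whose every line has a first token but some 'use' line has no later
-- 'back' line; B returns just the blocks of the 'use' lines that are closed.
def Raises_get_attack_blocks (lines : List String) : Prop :=
  (∀ l ∈ lines, PySem.Str.split₀ l ≠ []) ∧
  (∃ i ∈ List.range lines.length, pvTok (lines.getD i "") = "use" ∧
    ∀ j ∈ List.range lines.length, i < j → pvTok (lines.getD j "") ≠ "back")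
instance (lines : List String) : Decidable (Raises_get_attack_blocks lines) := by
  unfold Raises_get_attack_blocks; infer_instance

def pvRaiseWitness_get_attack_blocks : List String := ["use exploit", "back", "use other"]
def pvRaiseWitnessOut_get_attack_blocks : List (List String) := [["use exploit", "back"]]

def Spec_get_attack_blocks (lines : List String) (out : List (List String)) : Prop :=
  out = get_attack_blocks_alt lines
instance (lines : List String) (out : List (List String)) : Decidable (Spec_get_attack_blocks lines out) := by
  unfold Spec_get_attack_blocks; infer_instance

-- ===== CLAIM (what is proved, stated in full; the proofs are below) =====
def Claim_equal_get_attack_blocks : Prop := ∀ (lines : List String), Dom_get_attack_blocks lines → Pre_get_attack_blocks lines → Spec_get_attack_blocks lines (get_attack_blocks lines)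
def Claim_raises_get_attack_blocks : Prop := (∀ (lines : List String), Dom_get_attack_blocks lines → Raises_get_attack_blocks lines → ¬ Pre_get_attack_blocks lines) ∧ (Dom_get_attack_blocks (pvRaiseWitness_get_attack_blocks) ∧ Raises_get_attack_blocks (pvRaiseWitness_get_attack_blocks) ∧ get_attack_blocks_alt (pvRaiseWitness_get_attack_blocks) = pvRaiseWitnessOut_get_attack_blocks)

-- ===== LEMMAS AND PROOFS =====


lemma fb_some (lines : List String) (i j : Nat) (h : pvFindBack lines i = some j) :
    i ≤ j ∧ j < lines.length ∧ pvTok (lines.getD j "") = "back" := by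
  fun_induction pvFindBack lines i with
  | case1 i hi htok =>
      cases h
      exact ⟨le_refl _, hi, by simpa [List.getD_eq_getElem?_getD, List.getElem?_eq_getElem hi] using htok⟩
  | case2 i hi htok ih =>
      have := ih h; exact ⟨by omega, this.2.1, this.2.2⟩
  | case3 i hi => simp_all

lemma fb_le (lines : List String) (i j0 : Nat) (hij : i ≤ j0) (hj0 : j0 < lines.length)
    (ht : pvTok (lines.getD j0 "") = "back") :
    ∃ j, pvFindBack lines i = some j ∧ j ≤ j0 := by
  fun_induction pvFindBack lines i with
  | case1 i hi htok => exact ⟨i, rfl, hij⟩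
  | case2 i hi htok ih =>
      rcases Nat.eq_or_lt_of_le hij with h | h
      · subst h; simp [List.getD_eq_getElem?_getD, List.getElem?_eq_getElem hi] at ht; exact absurd ht htok
      · exact ih (by omega) 
  | case3 i hi => omega

def pvClosed (lines : List String) (k i : Nat) : Bool :=
  match pvFindBack lines (i + 1) with
  | some j => decide (j < k)
  | none => false

-- F2: a step whose token is not "back" closes nothing
lemma closed_succ_of_ne (lines : List String) (k i : Nat)
    (hk : k < lines.length) (ht : pvTok (lines.getD k "") ≠ "back") :
    pvClosed lines (k + 1) i = pvClosed lines k i := by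
  unfold pvClosed
  cases hfb : pvFindBack lines (i + 1) with
  | none => rfl
  | some j =>
      have hs := fb_some lines (i+1) j hfb
      have : j ≠ k := fun h => ht (h ▸ hs.2.2)
      simp; omega

-- F3: the line just processed can never already be closed
lemma closed_self_false (lines : List String) (k : Nat) :
    pvClosed lines (k + 1) k = false := by
  unfold pvClosed
  cases hfb : pvFindBack lines (k + 1) with
  | none => rfl
  | some j =>
      have hs := fb_some lines (k+1) j hfb
      simp; omega

-- F4: a "back" at k closes every earlier index
lemma closed_succ_of_back (lines : List String) (k i : Nat) (hik : i < k)
    (hk : k < lines.length) (ht : pvTok (lines.getD k "") = "back") :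
    pvClosed lines (k + 1) i = true := by
  obtain ⟨j, hfb, hj⟩ := fb_le lines (i+1) k (by omega) hk ht
  unfold pvClosed
  simp [hfb]; omega

-- F5: an index open at k and closed by the "back" at k has exactly k as its closer
lemma fb_eq_of_open_back (lines : List String) (k i : Nat) (hik : i < k)
    (hk : k < lines.length) (ht : pvTok (lines.getD k "") = "back")
    (hop : pvClosed lines k i = false) :
    pvFindBack lines (i + 1) = some k := by
  obtain ⟨j, hfb, hj⟩ := fb_le lines (i+1) k (by omega) hk ht
  unfold pvClosed at hop
  rw [hfb] at hop
  simp at hop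
  have : j = k := by omega
  subst this; exact hfb

-- order lemma: closed 'use' indices all precede open ones
lemma filter_closed_split (l : List Nat) (P C : Nat → Bool) (hl : l.Pairwise (· < ·))
    (h : ∀ a ∈ l, ∀ b ∈ l, a < b → P a = true → P b = true → C b = true → C a = true) :
    l.filter (fun i => P i && C i) ++ l.filter (fun i => P i && !C i) = l.filter P := by
  induction l with
  | nil => simp
  | cons x rest ih =>
      have hrest : rest.Pairwise (· < ·) := hl.of_cons
      have hx : ∀ b ∈ rest, x < b := fun b hb => List.rel_of_pairwise_cons hl hb
      have h' : ∀ a ∈ rest, ∀ b ∈ rest, a < b → P a = true → P b = true → C b = true → C a = true :=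
        fun a ha b hb => h a (by simp [ha]) b (by simp [hb])
      by_cases hP : P x = true
      · by_cases hC : C x = true
        · simpa [hP, hC] using ih hrest h'
        · have hnone : ∀ b ∈ rest, ¬ (P b && C b) = true := by
            intro b hb hbc
            simp only [Bool.and_eq_true] at hbc
            have := h x (by simp) b (by simp [hb]) (hx b hb) hP hbc.1 hbc.2
            simp [this] at hC
          have h1 : rest.filter (fun i => P i && C i) = [] :=
            List.filter_eq_nil_iff.mpr hnone
          have h2 : rest.filter (fun i => P i && !C i) = rest.filter P := by
            apply List.filter_congr
            intro b hb
            by_cases hPb : P b = true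
            · have : C b = false := by
                cases hCb : C b
                · rfl
                · exact absurd (by simp [hPb, hCb]) (hnone b hb)
              simp [hPb, this]
            · simp [hPb]
          simp [hP, hC, h1, h2]
      · simpa [hP] using ih hrest h'

lemma A_inv (lines : List String) (k : Nat) (hk : k ≤ lines.length) :
    (PySem.List.enumerate (lines.take k)).foldl
      (fun blocks (p : Int × String) =>
        if ¬ (pvTok p.2 = "use") then blocks
        else
          match pvFindBack lines (p.1.toNat + 1) with
          | some j => blocks ++ [PySem.List.slice lines (some p.1) (some ((j : Int) + 1))]
          | none => blocks) []
    = ((List.range k).filter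
        (fun i => decide (pvTok (lines.getD i "") = "use") && (pvFindBack lines (i+1)).isSome)).map
        (fun (i : Nat) => PySem.List.slice lines (some (i : Int))
          (some (((pvFindBack lines (i+1)).getD 0 : Int) + 1))) := by
  induction k with
  | zero => simp
  | succ k ih =>
      have hkn : k < lines.length := by omega
      rw [List.take_add_one, List.getElem?_eq_getElem hkn]
      simp only [Option.toList_some]
      rw [PySem.List.enumerate_append, List.foldl_append, ih (by omega)]
      have hgd : lines.getD k "" = lines[k] := List.getD_eq_getElem lines "" hkn
      simp only [PySem.List.enumerate, List.length_take, Nat.min_eq_left (Nat.le_of_lt hkn)]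
      rw [List.range_succ, List.filter_append, List.map_append]
      simp only [List.filter_cons, List.filter_nil, List.foldl_cons, List.foldl_nil]
      by_cases hu : pvTok lines[k] = "use"
      · cases hfb : pvFindBack lines (k + 1) with
        | none => simp [List.getElem?_eq_getElem hkn, hu, hfb]
        | some j => simp [List.getElem?_eq_getElem hkn, hu, hfb]
      · simp [List.getElem?_eq_getElem hkn, hu]

-- closing order: if a later 'use' is closed before k, an earlier one is too
lemma closed_mono (lines : List String) (k a b : Nat) (hab : a < b)
    (hc : pvClosed lines k b = true) : pvClosed lines k a = true := by
  unfold pvClosed at hc ⊢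
  cases hfb : pvFindBack lines (b + 1) with
  | none => rw [hfb] at hc; exact absurd hc (by simp)
  | some j' =>
      rw [hfb] at hc
      simp at hc
      have hs := fb_some lines (b+1) j' hfb
      obtain ⟨j, hj, hjle⟩ := fb_le lines (a+1) j' (by omega) hs.2.1 hs.2.2
      rw [hj]; simp; omega

lemma B_inv (lines : List String) (k : Nat) (hk : k ≤ lines.length) :
    (PySem.List.enumerate (lines.take k)).foldl
      (fun (st : List (List String) × List Int) p =>
        let tok := pvTok p.2
        if tok = "use" then (st.1, st.2 ++ [p.1])
        else if tok = "back" then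
          (st.1 ++ st.2.map (fun s => PySem.List.slice lines (some s) (some (p.1 + 1))), [])
        else st)
      ([], [])
    = ( ((List.range k).filter
          (fun i => decide (pvTok (lines.getD i "") = "use") && pvClosed lines k i)).map
          (fun (i : Nat) => PySem.List.slice lines (some (i : Int))
            (some (((pvFindBack lines (i+1)).getD 0 : Int) + 1))),
        ((List.range k).filter
          (fun i => decide (pvTok (lines.getD i "") = "use") && !pvClosed lines k i)).map
          (fun (i : Nat) => (i : Int)) ) := by
  induction k with
  | zero => simp
  | succ k ih =>
      have hkn : k < lines.length := by omega
      rw [List.take_add_one, List.getElem?_eq_getElem hkn]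
      simp only [Option.toList_some]
      rw [PySem.List.enumerate_append, List.foldl_append, ih (by omega)]
      simp only [PySem.List.enumerate, List.length_take, Nat.min_eq_left (Nat.le_of_lt hkn)]
      have hgd : lines.getD k "" = lines[k] := List.getD_eq_getElem lines "" hkn
      rw [List.range_succ, List.filter_append, List.filter_append, List.map_append, List.map_append]
      simp only [List.filter_cons, List.filter_nil, List.foldl_cons, List.foldl_nil]
      by_cases hu : pvTok lines[k] = "use"
      · -- a 'use' line: nothing closes, k becomes pending
        have hne : pvTok (lines.getD k "") ≠ "back" := by rw [hgd, hu]; decide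
        have c1 : ∀ i ∈ List.range k,
            (decide (pvTok (lines.getD i "") = "use") && pvClosed lines (k+1) i)
            = (decide (pvTok (lines.getD i "") = "use") && pvClosed lines k i) := by
          intro i _; rw [closed_succ_of_ne lines k i hkn hne]
        have c2 : ∀ i ∈ List.range k,
            (decide (pvTok (lines.getD i "") = "use") && !pvClosed lines (k+1) i)
            = (decide (pvTok (lines.getD i "") = "use") && !pvClosed lines k i) := by
          intro i _; rw [closed_succ_of_ne lines k i hkn hne]
        rw [List.filter_congr c1, List.filter_congr c2]
        simp [List.getElem?_eq_getElem hkn, hu, closed_self_false]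
      · by_cases hb : pvTok lines[k] = "back"
        · have hbk : pvTok (lines.getD k "") = "back" := by rw [hgd]; exact hb
          have c1 : ∀ i ∈ List.range k,
              (decide (pvTok (lines.getD i "") = "use") && pvClosed lines (k+1) i)
              = (decide (pvTok (lines.getD i "") = "use")) := by
            intro i hi
            rw [closed_succ_of_back lines k i (List.mem_range.mp hi) hkn hbk, Bool.and_true]
          have c2 : ∀ i ∈ List.range k,
              (decide (pvTok (lines.getD i "") = "use") && !pvClosed lines (k+1) i)
              = false := by
            intro i hi
            rw [closed_succ_of_back lines k i (List.mem_range.mp hi) hkn hbk]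
            simp
          rw [List.filter_congr c1, List.filter_congr c2]
          rw [← filter_closed_split (List.range k)
                (fun i => decide (pvTok (lines.getD i "") = "use"))
                (fun i => pvClosed lines k i) (List.pairwise_lt_range)
                (fun a _ b _ hab _ _ hcb => closed_mono lines k a b hab hcb)]
          simp only [List.map_append, List.map_map, List.filter_false]
          simp [List.getElem?_eq_getElem hkn, hb]
          intro a ha _ hop
          rw [fb_eq_of_open_back lines k a ha hkn hbk hop]
          simp
        · have hne : pvTok (lines.getD k "") ≠ "back" := by rw [hgd]; exact hb
          have c1 : ∀ i ∈ List.range k,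
              (decide (pvTok (lines.getD i "") = "use") && pvClosed lines (k+1) i)
              = (decide (pvTok (lines.getD i "") = "use") && pvClosed lines k i) := by
            intro i _; rw [closed_succ_of_ne lines k i hkn hne]
          have c2 : ∀ i ∈ List.range k,
              (decide (pvTok (lines.getD i "") = "use") && !pvClosed lines (k+1) i)
              = (decide (pvTok (lines.getD i "") = "use") && !pvClosed lines k i) := by
            intro i _; rw [closed_succ_of_ne lines k i hkn hne]
          rw [List.filter_congr c1, List.filter_congr c2]
          simp [List.getElem?_eq_getElem hkn, hu, hb]

theorem get_attack_blocks_agree (lines : List String) :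
    get_attack_blocks lines = get_attack_blocks_alt lines := by
  unfold get_attack_blocks get_attack_blocks_alt
  have hA := A_inv lines lines.length (le_refl _)
  have hB := B_inv lines lines.length (le_refl _)
  rw [List.take_length] at hA hB
  rw [hA, hB]
  have c : ∀ i ∈ List.range lines.length,
      (decide (pvTok (lines.getD i "") = "use") && (pvFindBack lines (i+1)).isSome)
      = (decide (pvTok (lines.getD i "") = "use") && pvClosed lines lines.length i) := by
    intro i _
    have : (pvFindBack lines (i+1)).isSome = pvClosed lines lines.length i := by
      unfold pvClosed
      cases hfb : pvFindBack lines (i+1) with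
      | none => rfl
      | some j =>
          have hs := fb_some lines (i+1) j hfb
          simp [hs.2.1]
    rw [this]
  rw [List.filter_congr c]

-- ===== VERDICT (by name: the statement is the Claim_ definition above) =====
theorem get_attack_blocks_spec : Claim_equal_get_attack_blocks := by
  intro lines _ _
  unfold Spec_get_attack_blocks
  exact get_attack_blocks_agree lines

@[simp] theorem get_attack_blocks_raises : Claim_raises_get_attack_blocks := by
  unfold Claim_raises_get_attack_blocks
  constructor
  · intro lines _ hr hp
    obtain ⟨i, hi, huse, hall⟩ := hr.2
    obtain ⟨j, hj, hij, hback⟩ := hp.2 i hi huse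
    exact hall j hj hij hback
  · decide
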